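-- pv_equiv track=rewrite | github.com/MrBrantCode/unitest_baseline | mut_generate/mist_train_cf/cf_65637/solution.py | find_swap_pairs
-- ===== SOURCE A (Python) =====
-- def find_swap_pairs(sequence):
--     if not sequence or len(sequence) < 2:
--         return {'index': -1, 'swap_with': -1}
--
--     index = -1
--     swap_with = -1
--
--     for i in range(len(sequence) - 1):
--         if sequence[i] > sequence[i + 1]:
--             index = i + 1
--             temp_swap_with = -1
--
--             for j in range(i, -1, -1):
--                 if sequence[j] < sequence[index]:
--                     temp_swap_with = j
--                     break
--             if temp_swap_with != -1:
--                 swap_with = temp_swap_with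
--                 break
--
--     return {'index': index, 'swap_with': swap_with}
-- ===== SOURCE B (Python) =====
-- def find_swap_pairs(sequence):
--     if len(sequence) < 2:
--         return {'index': -1, 'swap_with': -1}
--     last = -1
--     pmin = sequence[0]   # running minimum of the prefix before the current element
--     prev = sequence[0]
--     pos = 1
--     for cur in sequence[1:]:
--         if prev > cur:
--             last = pos
--             if pmin < cur:
--                 # a partner exists; take the nearest one to the left
--                 j = next(j for j in reversed(range(pos)) if sequence[j] < cur)
--                 return {'index': pos, 'swap_with': j}
--         if cur < pmin:
--             pmin = cur
--         prev = cur
--         pos += 1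
--     return {'index': last, 'swap_with': -1}
-- ===== Notes on version B (the rewrite author's own statement) =====
-- stated objective: faster
-- what changed: A single forward pass over the elements carries a running prefix minimum that decides in O(1) whether a valid swap partner exists, so the backward partner search runs only once (at the first valid descent) instead of at every descent.
import Mathlib
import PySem

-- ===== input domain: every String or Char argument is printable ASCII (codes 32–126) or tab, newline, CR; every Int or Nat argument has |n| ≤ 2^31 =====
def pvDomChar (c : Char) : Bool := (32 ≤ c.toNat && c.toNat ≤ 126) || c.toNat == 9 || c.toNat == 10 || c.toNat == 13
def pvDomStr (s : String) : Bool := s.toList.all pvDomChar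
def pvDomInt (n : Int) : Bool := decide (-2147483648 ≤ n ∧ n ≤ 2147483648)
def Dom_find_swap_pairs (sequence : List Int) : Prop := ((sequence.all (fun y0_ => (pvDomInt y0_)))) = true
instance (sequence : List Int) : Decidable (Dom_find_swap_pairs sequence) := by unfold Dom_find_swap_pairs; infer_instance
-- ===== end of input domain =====

-- B replaces A's per-descent backward rescans by one forward pass over the elements with a
-- running prefix minimum; the partner search runs once, at the first valid descent (faster).

-- ===== PORT A =====
-- inner loop of A: for j in range(i, -1, -1): if sequence[j] < target: return j; else -1
def pvInnerA (seq : List Int) (target : Int) : Nat → Int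
  | 0 => if seq.getD 0 0 < target then 0 else -1
  | j+1 => if seq.getD (j+1) 0 < target then ((j : Int) + 1) else pvInnerA seq target j

-- outer loop of A over i, carrying (index, swap_with); break is an early return
def pvOuterA (seq : List Int) (i : Nat) (index swap_with : Int) : Int × Int :=
  if i + 1 < seq.length then
    if seq.getD i 0 > seq.getD (i+1) 0 then
      let t := pvInnerA seq (seq.getD (i+1) 0) i
      if t ≠ -1 then (((i : Int) + 1), t)
      else pvOuterA seq (i+1) ((i : Int) + 1) swap_with
    else pvOuterA seq (i+1) index swap_with
  else (index, swap_with)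
termination_by seq.length - i

def find_swap_pairs (sequence : List Int) : List (String × Int) :=
  if sequence.length < 2 then [("index", -1), ("swap_with", -1)]
  else
    let r := pvOuterA sequence 0 (-1) (-1)
    [("index", r.1), ("swap_with", r.2)]

-- ===== PORT B =====
-- B's for-loop over sequence[1:], as structural recursion on that tail; state (prev, pos, pmin, last).
-- Python's `next(j for j in reversed(range(pos)) if sequence[j] < cur)` is the find? below; its
-- generator never exhausts when it runs (pmin < cur guarantees a hit), so getD 0 is not taken.
def pvGoB (seq : List Int) : List Int → Int → Nat → Int → Int → Int × Int
  | [], _, _, _, last => (last, -1)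
  | cur :: rest, prev, pos, pmin, last =>
    if prev > cur then
      if pmin < cur then
        (((pos : Nat) : Int), ((((List.range pos).reverse.find? (fun j => seq.getD j 0 < cur)).getD 0 : Nat) : Int))
      else pvGoB seq rest cur (pos + 1) (if cur < pmin then cur else pmin) ((pos : Nat) : Int)
    else pvGoB seq rest cur (pos + 1) (if cur < pmin then cur else pmin) last

def find_swap_pairs_alt (sequence : List Int) : List (String × Int) :=
  if sequence.length < 2 then [("index", -1), ("swap_with", -1)]
  else
    let r := pvGoB sequence (sequence.drop 1) (sequence.getD 0 0) 1 (sequence.getD 0 0) (-1)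
    [("index", r.1), ("swap_with", r.2)]

-- ===== PRECONDITION & SPEC =====
def Spec_find_swap_pairs (sequence : List Int) (out : List (String × Int)) : Prop := out = find_swap_pairs_alt sequence
instance (sequence : List Int) (out : List (String × Int)) : Decidable (Spec_find_swap_pairs sequence out) := by unfold Spec_find_swap_pairs; infer_instance

-- ===== CLAIM =====
def Claim_equal_find_swap_pairs : Prop := ∀ (sequence : List Int), Dom_find_swap_pairs sequence → Spec_find_swap_pairs sequence (find_swap_pairs sequence)

-- ===== LEMMAS AND PROOFS =====

theorem range_succ_reverse (n : Nat) : (List.range (n+1)).reverse = n :: (List.range n).reverse := by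
  rw [List.range_succ, List.reverse_append]; simp

theorem pvInnerA_eq_find (seq : List Int) (nxt : Int) (j : Nat)
    (h : ∃ k ≤ j, seq.getD k 0 < nxt) :
    pvInnerA seq nxt j
      = ((((List.range (j+1)).reverse.find? (fun k => seq.getD k 0 < nxt)).getD 0 : Nat) : Int) := by
  induction j with
  | zero =>
    obtain ⟨k, hk, hlt⟩ := h
    interval_cases k
    simp [pvInnerA, List.range_succ, List.getD_eq_getElem?_getD] at hlt ⊢
    simp [hlt]
  | succ j ih =>
    rw [range_succ_reverse]
    by_cases hj : seq.getD (j+1) 0 < nxt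
    · simp only [pvInnerA, List.find?_cons, List.getD_eq_getElem?_getD] at hj ⊢
      simp [hj]
    · simp only [pvInnerA, List.find?_cons, List.getD_eq_getElem?_getD] at hj ⊢
      rw [if_neg hj]
      have hd : (decide (seq[j+1]?.getD 0 < nxt)) = false := by simp [hj]
      rw [hd]
      simp only [List.getD_eq_getElem?_getD] at ih
      apply ih
      obtain ⟨k, hk, hlt⟩ := h
      simp only [List.getD_eq_getElem?_getD] at hlt
      refine ⟨k, ?_, hlt⟩
      rcases Nat.lt_or_ge k (j+1) with h' | h'
      · omega
      · exfalso; have : k = j + 1 := by omega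
        subst this; exact hj hlt

theorem pvInnerA_eq_neg (seq : List Int) (nxt : Int) (j : Nat)
    (h : ∀ k ≤ j, ¬ seq.getD k 0 < nxt) :
    pvInnerA seq nxt j = -1 := by
  induction j with
  | zero => unfold pvInnerA; rw [if_neg (h 0 (le_refl 0))]
  | succ j ih =>
    simp only [pvInnerA, if_neg (h (j+1) (le_refl _))]
    exact ih (fun k hk => h k (by omega))

theorem pvGoB_eq (rest : List Int) : ∀ (seq : List Int) (i : Nat) (idx pmin : Int),
    seq.drop (i+1) = rest →
    (∃ k ≤ i, seq.getD k 0 = pmin) →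
    (∀ k ≤ i, pmin ≤ seq.getD k 0) →
    pvOuterA seq i idx (-1) = pvGoB seq rest (seq.getD i 0) (i+1) pmin idx := by
  induction rest with
  | nil =>
    intro seq i idx pmin hdrop _ _
    have hlen : seq.length ≤ i + 1 := by
      have := List.drop_eq_nil_iff.mp hdrop; omega
    unfold pvOuterA pvGoB
    rw [if_neg (by omega)]
  | cons cur rest ih =>
    intro seq i idx pmin hdrop hw hl
    have hlen : i + 1 < seq.length := by
      by_contra h
      rw [List.drop_eq_nil_of_le (by omega)] at hdrop
      simp at hdrop
    have hcur : seq.getD (i+1) 0 = cur := by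
      have h1 : (seq.drop (i+1)).head? = some cur := by rw [hdrop]; rfl
      rw [List.head?_drop] at h1
      simp [List.getD_eq_getElem?_getD, h1]
    have hrest : seq.drop (i+1+1) = rest := by
      have : seq.drop (i+1+1) = (seq.drop (i+1)).drop 1 := by
        rw [List.drop_drop]
      rw [this, hdrop]; rfl
    unfold pvOuterA pvGoB
    rw [if_pos hlen]
    simp only [hcur]
    by_cases hd : seq.getD i 0 > cur
    · rw [if_pos hd, if_pos hd]
      by_cases hp : pmin < cur
      · rw [if_pos hp]
        obtain ⟨k, hk, hkeq⟩ := hw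
        have hex : ∃ k ≤ i, seq.getD k 0 < cur := ⟨k, hk, by omega⟩
        have heq := pvInnerA_eq_find seq cur i hex
        rw [if_pos (by rw [heq]; omega)]
        rw [heq]
        push_cast
        rfl
      · rw [if_neg hp]
        have hall : ∀ k ≤ i, ¬ seq.getD k 0 < cur := fun k hk h' => by
          have := hl k hk; omega
        rw [if_neg (by rw [pvInnerA_eq_neg seq cur i hall]; simp)]
        have := ih seq (i+1) ((i : Int) + 1) (if cur < pmin then cur else pmin) hrest
          ?_ ?_
        · rw [this, hcur]
          congr 1
        · by_cases hm : cur < pmin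
          · exact ⟨i+1, le_refl _, by rw [if_pos hm]; exact hcur⟩
          · obtain ⟨k, hk, hkeq⟩ := hw
            exact ⟨k, by omega, by rw [if_neg hm]; exact hkeq⟩
        · intro k hk
          rcases Nat.lt_or_ge k (i+1) with h' | h'
          · have := hl k (by omega); split <;> omega
          · have : k = i + 1 := by omega
            subst this; rw [hcur]; split <;> omega
    · rw [if_neg hd, if_neg hd]
      have := ih seq (i+1) idx (if cur < pmin then cur else pmin) hrest ?_ ?_
      · rw [this, hcur]
      · by_cases hm : cur < pmin
        · exact ⟨i+1, le_refl _, by rw [if_pos hm]; exact hcur⟩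
        · obtain ⟨k, hk, hkeq⟩ := hw
          exact ⟨k, by omega, by rw [if_neg hm]; exact hkeq⟩
      · intro k hk
        rcases Nat.lt_or_ge k (i+1) with h' | h'
        · have := hl k (by omega); split <;> omega
        · have : k = i + 1 := by omega
          subst this; rw [hcur]; split <;> omega

-- ===== VERDICT =====
theorem find_swap_pairs_spec : Claim_equal_find_swap_pairs := by
  intro sequence _
  unfold Spec_find_swap_pairs find_swap_pairs find_swap_pairs_alt
  by_cases h : sequence.length < 2
  · rw [if_pos h, if_pos h]
  · rw [if_neg h, if_neg h]
    simp only
    rw [pvGoB_eq (sequence.drop 1) sequence 0 (-1) (sequence.getD 0 0)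
      rfl ⟨0, le_refl 0, rfl⟩ (by intro k hk; interval_cases k; exact le_refl _)]
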